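-- pv_equiv track=rewrite | github.com/Bklein19/PhonologyToolkit | phoneFinder.py | phoneFinder
-- ===== SOURCE A (Python) =====
-- def phoneFinder(givenFeatures):
--     featureDict = {"p": ["+consonantal", "-sonorant", "-continuant",
--                          "-delayed release", "-approximant", "-tap",
--                          "-trill", "-nasal", "-voice", "-spread glottis",
--                          "-constricted glottis", "+labial", "-round", "-labiodental",
--                          "-coronal", "0anterior", "0distributed", "0strident", "-lateral",
--                          "dorsal", "0ALLVOWEL"],
--                    "b" : ["+consonantal", "-sonorant", "-continuant",
--                          "-delayed release", "-approximant", "-tap",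
--                          "-trill", "-nasal", "+voice", "-spread glottis",
--                          "-constricted glottis", "+labial", "-round", "-labiodental",
--                          "-coronal", "0anterior", "0distributed", "0strident", "-lateral",
--                          "dorsal", "0ALLVOWEL"],
--                    "m" : ["+consonantal", "+sonorant", "-continuant",
--                          "0delayed release", "-approximant", "-tap",
--                          "-trill", "+nasal", "+voice", "-spread glottis",
--                          "-constricted glottis", "+labial", "-round", "-labiodental",
--                          "-coronal", "0anterior", "0distributed", "0strident", "-lateral",
--                          "dorsal", "0ALLVOWEL"],
--                    #labiodental
--                    "f" : ["+consonantal", "-sonorant", "+continuant",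
--                          "+delayed release", "-approximant", "-tap",
--                          "-trill", "-nasal", "-voice", "-spread glottis",
--                          "-constricted glottis", "+labial", "-round", "+labiodental",
--                          "-coronal", "0anterior", "0distributed", "0strident", "-lateral",
--                          "dorsal", "0ALLVOWEL"],
--                    "v" : ["+consonantal", "-sonorant", "+continuant",
--                          "+delayed release", "-approximant", "-tap",
--                          "-trill", "-nasal", "+voice", "-spread glottis",
--                          "-constricted glottis", "+labial", "-round", "+labiodental",
--                          "-coronal", "0anterior", "0distributed", "0strident", "-lateral",
--                          "dorsal", "0ALLVOWEL"],
--                    #alveolar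
--                    "t" : ["+consonantal", "-sonorant", "-continuant",
--                          "-delayed release", "-approximant", "-tap",
--                          "-trill", "-nasal", "-voice", "-spread glottis",
--                          "-constricted glottis", "-labial", "-round", "-labiodental",
--                          "+coronal", "+anterior", "-distributed", "-strident", "-lateral",
--                          "dorsal", "0ALLVOWEL"],
--                    "d" : ["+consonantal", "-sonorant", "-continuant",
--                          "-delayed release", "-approximant", "-tap",
--                          "-trill", "-nasal", "+voice", "-spread glottis",
--                          "-constricted glottis", "-labial", "-round", "-labiodental",
--                          "+coronal", "+anterior", "-distributed", "-strident", "-lateral",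
--                          "dorsal", "0ALLVOWEL"],
--                   "s" : ["+consonantal", "-sonorant", "+continuant",
--                          "+delayed release", "-approximant", "-tap",
--                          "-trill", "-nasal", "-voice", "-spread glottis",
--                          "-constricted glottis", "-labial", "-round", "-labiodental",
--                          "+coronal", "+anterior", "-distributed", "+strident", "-lateral",
--                          "dorsal", "0ALLVOWEL"],
--                    #TO REPRESENT ESH SYMBOL IPA
--                    "esh" : ["+consonantal", "-sonorant", "+continuant",
--                          "+delayed release", "-approximant", "-tap",
--                          "-trill", "-nasal", "-voice", "-spread glottis",
--                          "-constricted glottis", "-labial", "-round", "-labiodental",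
--                          "+coronal", "-anterior", "+distributed", "+strident", "-lateral",
--                          "dorsal", "0ALLVOWEL"],
--                   "z" : ["+consonantal", "-sonorant", "+continuant",
--                          "+delayed release", "-approximant", "-tap",
--                          "-trill", "-nasal", "+voice", "-spread glottis",
--                          "-constricted glottis", "-labial", "-round", "-labiodental",
--                          "+coronal", "+anterior", "-distributed", "+strident", "-lateral",
--                          "dorsal", "0ALLVOWEL"],
--                   "n" : ["+consonantal", "+sonorant", "-continuant",
--                          "0delayed release", "-approximant", "-tap",
--                          "-trill", "+nasal", "+voice", "-spread glottis",
--                          "-constricted glottis", "-labial", "-round", "-labiodental",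
--                          "+coronal", "+anterior", "-distributed", "-strident", "-lateral",
--                          "dorsal", "0ALLVOWEL"],
--                   "l" : ["+consonantal", "+sonorant", "+continuant",
--                          "0delayed release", "+approximant", "-tap",
--                          "-trill", "-nasal", "+voice", "-spread glottis",
--                          "-constricted glottis", "+labial", "-round", "-labiodental",
--                          "+coronal", "+anterior", "-distributed", "-strident", "+lateral",
--                          "dorsal", "0ALLVOWEL"],
--                   #vowels
--                   "a" : ["0ALLCONSONANT", "-high", "+low", "0tense", "-front", "-back", "-round"],
--                   "e" : ["0ALLCONSONANT", "-high", "-low", "+tense", "+front", "-back", "-round"],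
--                   "i" : ["0ALLCONSONANT", "+high", "-low", "+tense", "+front", "-back", "-round"],
--                   "o" : ["0ALLCONSONANT", "-high", "-low", "+tense", "-front", "+back", "+round"],
--                   "u" : ["0ALLCONSONANT", "+high", "-low", "+tense", "-front", "+back", "+round"],}
--     phonesWithTheFeature = []
--     for keyPhone, valueFeatures in featureDict.items():
--         goodPhoneValue = 0
--         for f1 in valueFeatures:
--             for f2 in givenFeatures:
--                 if f2 == f1:
--                     goodPhoneValue = goodPhoneValue + 1
--         if goodPhoneValue == len(givenFeatures):
--             phonesWithTheFeature.append(keyPhone)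
--     return phonesWithTheFeature
-- ===== SOURCE B (Python) =====
-- CONS_NAMES = ["consonantal", "sonorant", "continuant", "delayed release",
--               "approximant", "tap", "trill", "nasal", "voice",
--               "spread glottis", "constricted glottis", "labial", "round",
--               "labiodental", "coronal", "anterior", "distributed",
--               "strident", "lateral", "dorsal", "ALLVOWEL"]
--
-- VOWEL_NAMES = ["ALLCONSONANT", "high", "low", "tense", "front", "back", "round"]
--
-- # per phone, one sign character per feature name ('.' = no sign, as in "dorsal")
-- CONS_SIGNS = [("p", "+----------+---000-.0"),
--               ("b", "+-------+--+---000-.0"),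
--               ("m", "++-0---++--+---000-.0"),
--               ("f", "+-++-------+-+-000-.0"),
--               ("v", "+-++----+--+-+-000-.0"),
--               ("t", "+-------------++---.0"),
--               ("d", "+-------+-----++---.0"),
--               ("s", "+-++----------++-+-.0"),
--               ("esh", "+-++----------+-++-.0"),
--               ("z", "+-++----+-----++-+-.0"),
--               ("n", "++-0---++-----++---.0"),
--               ("l", "+++0+---+--+--++--+.0")]
--
-- VOWEL_SIGNS = [("a", "0-+0---"),
--                ("e", "0--++--"),
--                ("i", "0+-++--"),
--                ("o", "0--+-++"),
--                ("u", "0+-+-++")]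
--
--
-- def _features(signs, names):
--     return {("" if c == "." else c) + n for c, n in zip(signs, names)}
--
--
-- def phoneFinder(givenFeatures):
--     rows = [(p, _features(s, CONS_NAMES)) for p, s in CONS_SIGNS] + \
--            [(p, _features(s, VOWEL_NAMES)) for p, s in VOWEL_SIGNS]
--     return [p for p, feats in rows if all(f in feats for f in givenFeatures)]
-- ===== Notes on version B (the rewrite author's own statement) =====
-- stated objective: faster
-- what changed: Replaces A's triple nested loop counting per-phone feature matches over a dict of full feature-string lists with a compressed sign-matrix table (one sign character per feature name) decompressed once into per-phone feature sets, each phone then tested with an all()-over-set-membership subset check that short-circuits.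
import Mathlib
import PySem

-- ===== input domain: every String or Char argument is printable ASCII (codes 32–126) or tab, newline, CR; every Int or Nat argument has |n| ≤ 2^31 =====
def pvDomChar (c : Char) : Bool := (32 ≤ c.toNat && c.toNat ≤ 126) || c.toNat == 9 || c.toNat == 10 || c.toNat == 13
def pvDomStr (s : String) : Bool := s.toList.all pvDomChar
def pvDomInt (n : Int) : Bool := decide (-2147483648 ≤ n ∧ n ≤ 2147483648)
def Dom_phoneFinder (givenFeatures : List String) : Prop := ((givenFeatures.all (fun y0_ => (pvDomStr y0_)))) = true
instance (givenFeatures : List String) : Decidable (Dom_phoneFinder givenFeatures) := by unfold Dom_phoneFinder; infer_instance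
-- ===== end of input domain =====

-- B replaces A's triple nested counting loop over a dict of full feature-string lists by a compressed
-- sign-matrix table (one sign character per feature name) from which each phone's feature set is
-- reconstructed once, and a set-membership subset test per phone; same return value, measured faster on long queries.

-- ===== PORT A =====
def featureData : List (String × List String) := [
  ("p", ["+consonantal", "-sonorant", "-continuant", "-delayed release", "-approximant", "-tap", "-trill", "-nasal", "-voice", "-spread glottis", "-constricted glottis", "+labial", "-round", "-labiodental", "-coronal", "0anterior", "0distributed", "0strident", "-lateral", "dorsal", "0ALLVOWEL"]),
  ("b", ["+consonantal", "-sonorant", "-continuant", "-delayed release", "-approximant", "-tap", "-trill", "-nasal", "+voice", "-spread glottis", "-constricted glottis", "+labial", "-round", "-labiodental", "-coronal", "0anterior", "0distributed", "0strident", "-lateral", "dorsal", "0ALLVOWEL"]),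
  ("m", ["+consonantal", "+sonorant", "-continuant", "0delayed release", "-approximant", "-tap", "-trill", "+nasal", "+voice", "-spread glottis", "-constricted glottis", "+labial", "-round", "-labiodental", "-coronal", "0anterior", "0distributed", "0strident", "-lateral", "dorsal", "0ALLVOWEL"]),
  ("f", ["+consonantal", "-sonorant", "+continuant", "+delayed release", "-approximant", "-tap", "-trill", "-nasal", "-voice", "-spread glottis", "-constricted glottis", "+labial", "-round", "+labiodental", "-coronal", "0anterior", "0distributed", "0strident", "-lateral", "dorsal", "0ALLVOWEL"]),
  ("v", ["+consonantal", "-sonorant", "+continuant", "+delayed release", "-approximant", "-tap", "-trill", "-nasal", "+voice", "-spread glottis", "-constricted glottis", "+labial", "-round", "+labiodental", "-coronal", "0anterior", "0distributed", "0strident", "-lateral", "dorsal", "0ALLVOWEL"]),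
  ("t", ["+consonantal", "-sonorant", "-continuant", "-delayed release", "-approximant", "-tap", "-trill", "-nasal", "-voice", "-spread glottis", "-constricted glottis", "-labial", "-round", "-labiodental", "+coronal", "+anterior", "-distributed", "-strident", "-lateral", "dorsal", "0ALLVOWEL"]),
  ("d", ["+consonantal", "-sonorant", "-continuant", "-delayed release", "-approximant", "-tap", "-trill", "-nasal", "+voice", "-spread glottis", "-constricted glottis", "-labial", "-round", "-labiodental", "+coronal", "+anterior", "-distributed", "-strident", "-lateral", "dorsal", "0ALLVOWEL"]),
  ("s", ["+consonantal", "-sonorant", "+continuant", "+delayed release", "-approximant", "-tap", "-trill", "-nasal", "-voice", "-spread glottis", "-constricted glottis", "-labial", "-round", "-labiodental", "+coronal", "+anterior", "-distributed", "+strident", "-lateral", "dorsal", "0ALLVOWEL"]),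
  ("esh", ["+consonantal", "-sonorant", "+continuant", "+delayed release", "-approximant", "-tap", "-trill", "-nasal", "-voice", "-spread glottis", "-constricted glottis", "-labial", "-round", "-labiodental", "+coronal", "-anterior", "+distributed", "+strident", "-lateral", "dorsal", "0ALLVOWEL"]),
  ("z", ["+consonantal", "-sonorant", "+continuant", "+delayed release", "-approximant", "-tap", "-trill", "-nasal", "+voice", "-spread glottis", "-constricted glottis", "-labial", "-round", "-labiodental", "+coronal", "+anterior", "-distributed", "+strident", "-lateral", "dorsal", "0ALLVOWEL"]),
  ("n", ["+consonantal", "+sonorant", "-continuant", "0delayed release", "-approximant", "-tap", "-trill", "+nasal", "+voice", "-spread glottis", "-constricted glottis", "-labial", "-round", "-labiodental", "+coronal", "+anterior", "-distributed", "-strident", "-lateral", "dorsal", "0ALLVOWEL"]),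
  ("l", ["+consonantal", "+sonorant", "+continuant", "0delayed release", "+approximant", "-tap", "-trill", "-nasal", "+voice", "-spread glottis", "-constricted glottis", "+labial", "-round", "-labiodental", "+coronal", "+anterior", "-distributed", "-strident", "+lateral", "dorsal", "0ALLVOWEL"]),
  ("a", ["0ALLCONSONANT", "-high", "+low", "0tense", "-front", "-back", "-round"]),
  ("e", ["0ALLCONSONANT", "-high", "-low", "+tense", "+front", "-back", "-round"]),
  ("i", ["0ALLCONSONANT", "+high", "-low", "+tense", "+front", "-back", "-round"]),
  ("o", ["0ALLCONSONANT", "-high", "-low", "+tense", "-front", "+back", "+round"]),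
  ("u", ["0ALLCONSONANT", "+high", "-low", "+tense", "-front", "+back", "+round"])]

def phoneFinder (givenFeatures : List String) : List String :=
  List.foldl (fun phonesWithTheFeature kv =>
    let goodPhoneValue : Int :=
      List.foldl (fun g f1 =>
        List.foldl (fun g f2 => if f2 == f1 then g + 1 else g) g givenFeatures) 0 kv.2
    if goodPhoneValue == (givenFeatures.length : Int) then phonesWithTheFeature ++ [kv.1]
    else phonesWithTheFeature) [] featureData

-- ===== PORT B =====
def consNames : List String :=
  ["consonantal", "sonorant", "continuant", "delayed release", "approximant", "tap", "trill",
   "nasal", "voice", "spread glottis", "constricted glottis", "labial", "round", "labiodental",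
   "coronal", "anterior", "distributed", "strident", "lateral", "dorsal", "ALLVOWEL"]

def vowelNames : List String :=
  ["ALLCONSONANT", "high", "low", "tense", "front", "back", "round"]

-- per phone, one sign character per feature name ('.' = no sign, as in "dorsal")
def consSigns : List (String × String) :=
  [("p", "+----------+---000-.0"),
   ("b", "+-------+--+---000-.0"),
   ("m", "++-0---++--+---000-.0"),
   ("f", "+-++-------+-+-000-.0"),
   ("v", "+-++----+--+-+-000-.0"),
   ("t", "+-------------++---.0"),
   ("d", "+-------+-----++---.0"),
   ("s", "+-++----------++-+-.0"),
   ("esh", "+-++----------+-++-.0"),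
   ("z", "+-++----+-----++-+-.0"),
   ("n", "++-0---++-----++---.0"),
   ("l", "+++0+---+--+--++--+.0")]

def vowelSigns : List (String × String) :=
  [("a", "0-+0---"),
   ("e", "0--++--"),
   ("i", "0+-++--"),
   ("o", "0--+-++"),
   ("u", "0+-+-++")]

def featuresOf (signs : String) (names : List String) : PySem.Set String :=
  PySem.Set.ofList
    (List.zipWith (fun c n => (if c == '.' then "" else String.ofList [c]) ++ n) signs.toList names)

def phoneFinder_alt (givenFeatures : List String) : List String :=
  let rows : List (String × PySem.Set String) :=
    consSigns.map (fun ps => (ps.1, featuresOf ps.2 consNames)) ++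
    vowelSigns.map (fun ps => (ps.1, featuresOf ps.2 vowelNames))
  rows.filterMap (fun row =>
    if givenFeatures.all (fun f => row.2.contains f) then some row.1 else none)

-- ===== PRECONDITION & SPEC =====
def Spec_phoneFinder (givenFeatures : List String) (out : List String) : Prop := out = phoneFinder_alt givenFeatures
instance (givenFeatures : List String) (out : List String) : Decidable (Spec_phoneFinder givenFeatures out) := by unfold Spec_phoneFinder; infer_instance

-- ===== CLAIM (what is proved, stated in full; the proofs are below) =====
def Claim_equal_phoneFinder : Prop := ∀ (givenFeatures : List String), Dom_phoneFinder givenFeatures → Spec_phoneFinder givenFeatures (phoneFinder givenFeatures)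

-- ===== LEMMAS AND PROOFS =====

-- B's compressed table, decompressed, is exactly A's dict (as sets of duplicate-free lists)
lemma rows_eq :
    consSigns.map (fun ps => (ps.1, featuresOf ps.2 consNames)) ++
    vowelSigns.map (fun ps => (ps.1, featuresOf ps.2 vowelNames))
      = featureData.map (fun kv => (kv.1, PySem.Set.ofList kv.2)) := by
  decide

-- comprehension with a filter = filter then map
lemma filterMap_if_fst {α β : Type} (p : α × β → Bool) :
    ∀ (l : List (α × β)),
      l.filterMap (fun row => if p row then some row.1 else none)
        = (l.filter p).map (fun row => row.1) := by
  intro l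
  induction l with
  | nil => rfl
  | cons x l ih =>
    simp only [List.filterMap_cons, List.filter_cons]
    by_cases hx : p x = true
    · simp [hx, ih]
    · simp [hx, ih]

-- A's nested counting loop computes the number of query features present (counted with multiplicity)
lemma countA_eq (given : List String) (F : List String) : ∀ (a : Int),
    List.foldl (fun g f1 =>
        List.foldl (fun g f2 => if f2 == f1 then g + 1 else g) g given) a F
      = a + (F.map (fun f => (given.count f : Int))).sum := by
  induction F with
  | nil => intro a; simp
  | cons f1 F ih =>
    intro a
    simp only [List.foldl_cons, List.map_cons, List.sum_cons]
    rw [PySem.List.foldl_count_if (fun f2 => f2 == f1) given a, ih,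
        ← List.count_eq_countP]
    ring

lemma sum_counts (F : List String) (hF : F.Nodup) (given : List String) :
    (F.map (fun f => (given.count f : Int))).sum
      = ((given.filter (fun g => decide (g ∈ F))).length : Int) := by
  induction given with
  | nil => simp
  | cons g gs ih =>
    have h1 : F.map (fun f => ((g :: gs).count f : Int))
        = F.map (fun f => (gs.count f : Int) + (if (g == f) = true then 1 else 0)) := by
      apply List.map_congr_left
      intro f _
      rw [List.count_cons]
      split <;> push_cast <;> ring
    rw [h1, PySem.List.sum_map_add_int, ih, PySem.List.sum_map_ite_one_zero]
    have h2 : List.countP (fun f => g == f) F = F.count g := by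
      rw [List.count_eq_countP]
      exact List.countP_congr (fun f _ => by rw [Bool.beq_comm])
    rw [h2]
    by_cases hg : g ∈ F
    · rw [List.count_eq_one_of_mem hF hg]
      simp only [List.filter_cons, hg, decide_true]
      push_cast [List.length_cons]
      omega
    · rw [List.count_eq_zero.mpr hg]
      simp only [List.filter_cons, hg, decide_false]
      simp

-- ===== VERDICT (by name: the statement is the Claim_ definition above) =====
theorem phoneFinder_spec : Claim_equal_phoneFinder := by
  intro given _
  unfold Spec_phoneFinder phoneFinder phoneFinder_alt
  have hnodups : ∀ kv ∈ featureData, (kv.2 : List String).Nodup := by decide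
  rw [rows_eq,
      filterMap_if_fst (fun row : String × PySem.Set String =>
        given.all (fun f => row.2.contains f)),
      PySem.List.foldl_append_if
        (fun kv : String × List String =>
          (List.foldl (fun g f1 =>
              List.foldl (fun g f2 => if f2 == f1 then g + 1 else g) g given) 0 kv.2 : Int)
            == (given.length : Int))
        (fun kv => kv.1) featureData [],
      List.nil_append, List.filter_map, List.map_map]
  apply congrArg
  apply List.filter_congr
  intro kv hkv
  rw [Function.comp_apply, countA_eq given kv.2 0, sum_counts kv.2 (hnodups kv hkv) given]
  have hiff : (((List.filter (fun g => decide (g ∈ kv.2)) given).length : Int)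
      = (given.length : Int)) ↔ (∀ f ∈ given, f ∈ kv.2) := by
    rw [Int.natCast_inj]
    constructor
    · intro h f hf
      exact of_decide_eq_true (List.length_filter_eq_length_iff.mp h f hf)
    · intro h
      exact List.length_filter_eq_length_iff.mpr (fun a ha => decide_eq_true (h a ha))
  rw [Bool.eq_iff_iff]
  simp only [zero_add, beq_iff_eq, List.all_eq_true,
    PySem.Set.contains_eq_listContains, List.contains_eq_mem, PySem.Set.mem_ofList,
    decide_eq_true_eq]
  exact hiff
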